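-- pv_equiv track=rewrite | github.com/MrBrantCode/unitest_baseline | mut_generate/mist_train_taco/taco_1493/solution.py | find_max_beauty_permutation
-- ===== SOURCE A (Python) =====
-- def find_max_beauty_permutation(n):
--     n += 1  # Adjust n to include 0 to n
--     s = n
--     t, r = [], list(range(n))[::-1]
--     k = 2 ** 20
--
--     while s:
--         while k >= 2 * s:
--             k //= 2
--         t = r[n - s:n + s - k] + t
--         s = k - s
--
--     max_beauty = n * n - n
--     permutation = t
--
--     return max_beauty, permutation
-- ===== SOURCE B (Python) =====
-- def find_max_beauty_permutation(n):
--     n += 1  # permutation of 0..n inclusive, length n (after adjustment)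
--
--     def build(top):
--         # permutation of 0..top maximizing beauty, built block by block from the front
--         if top < 0:
--             return []
--         b = 1
--         while b - 1 < top:  # smallest all-ones mask >= top
--             b *= 2
--         mask = b - 1
--         low = mask - top
--         return build(low - 1) + [mask - i for i in range(low, top + 1)]
--
--     return n * n - n, build(n - 1)
-- ===== Notes on version B (the rewrite author's own statement) =====
-- stated objective: simpler
-- what changed: Replaces the destructive loop over a shared halving power-of-two k with slices of a reversed full range and repeated prepend-concatenation by a direct recursion on the remaining top value that recomputes the smallest all-ones mask per block and emits each block as mask-i by formula, front to back; no reversed range list, no slicing, no persistent k.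
-- outside the precondition, e.g. on find_max_beauty_permutation(-2): A does not finish within the time limit, B returns (2, [])
import Mathlib
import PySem

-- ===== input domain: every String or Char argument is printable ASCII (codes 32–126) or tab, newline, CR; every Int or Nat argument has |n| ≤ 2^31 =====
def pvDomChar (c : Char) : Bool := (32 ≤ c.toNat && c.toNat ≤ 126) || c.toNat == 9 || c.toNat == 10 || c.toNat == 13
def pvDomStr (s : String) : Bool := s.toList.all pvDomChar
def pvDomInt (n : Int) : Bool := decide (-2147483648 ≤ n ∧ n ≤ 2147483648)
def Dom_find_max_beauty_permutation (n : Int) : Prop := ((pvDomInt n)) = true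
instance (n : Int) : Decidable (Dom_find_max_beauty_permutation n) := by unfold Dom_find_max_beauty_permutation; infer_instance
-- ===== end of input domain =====

-- B replaces A's slicing of a reversed range driven by a shared halving k with a direct
-- front-to-back recursion that recomputes each block's all-ones mask and writes the block
-- by the formula mask - i (objective: simpler).

-- ===== PORT A =====
-- inner 'while k >= 2 * s: k //= 2'; the fuel only makes the recursion total
-- (64 steps always suffice on the admitted inputs since k starts at 2^20)
def pvAInner (fuel : Nat) (k s : Int) : Int :=
  match fuel with
  | 0 => k
  | f + 1 => if 2 * s ≤ k then pvAInner f (PySem.Int.floordiv k 2) s else k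

-- outer 'while s:' loop of A; fuel is a totality guard (s strictly decreases on admitted inputs)
def pvALoop (fuel : Nat) (n : Int) (r : List Int) (s : Int) (t : List Int) (k : Int) : List Int :=
  match fuel with
  | 0 => t
  | f + 1 =>
    if s ≠ 0 then
      let k' := pvAInner 64 k s
      let t' := PySem.List.slice r (some (n - s)) (some (n + s - k')) ++ t
      pvALoop f n r (k' - s) t' k'
    else t

def find_max_beauty_permutation (n : Int) : Int × List Int :=
  let n := n + 1
  let s := n
  let t : List Int := []
  let r := (PySem.List.slice? (PySem.List.pyRange 0 n 1) none none (-1)).getD []  -- list(range(n))[::-1]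
  let k : Int := 2 ^ 20
  let t := pvALoop (n.toNat + 1) n r s t k
  (n * n - n, t)

-- ===== PORT B =====
-- 'while b - 1 < top: b *= 2'; fuel is a totality guard (64 steps suffice on Dom)
def pvBMask (fuel : Nat) (b top : Int) : Int :=
  match fuel with
  | 0 => b
  | f + 1 => if b - 1 < top then pvBMask f (b * 2) top else b

-- recursive 'build'; fuel is a totality guard (top strictly decreases on Dom)
def pvBuild (fuel : Nat) (top : Int) : List Int :=
  match fuel with
  | 0 => []
  | f + 1 =>
    if top < 0 then []
    else
      let mask := pvBMask 64 1 top - 1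
      let low := mask - top
      pvBuild f (low - 1) ++ (PySem.List.pyRange low (top + 1) 1).map (fun i => mask - i)

def find_max_beauty_permutation_alt (n : Int) : Int × List Int :=
  let n := n + 1
  (n * n - n, pvBuild (n.toNat + 1) (n - 1))

-- ===== PRECONDITION & SPEC =====
-- Pre_ excludes n < -1 and n > 2^20 - 1: there A's while-loops never terminate
-- (s goes negative, or s exceeds the initial k = 2^20), so A returns no value.
def Pre_find_max_beauty_permutation (n : Int) : Prop := -1 ≤ n ∧ n + 1 ≤ 2 ^ 20
instance (n : Int) : Decidable (Pre_find_max_beauty_permutation n) := by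
  unfold Pre_find_max_beauty_permutation; infer_instance

def pvWitness_find_max_beauty_permutation : Int := 5

def Spec_find_max_beauty_permutation (n : Int) (out : Int × List Int) : Prop := out = find_max_beauty_permutation_alt n
instance (n : Int) (out : Int × List Int) : Decidable (Spec_find_max_beauty_permutation n out) := by unfold Spec_find_max_beauty_permutation; infer_instance

-- ===== CLAIM (what is proved, stated in full; the proofs are below) =====
def Claim_equal_find_max_beauty_permutation : Prop := ∀ (n : Int), Dom_find_max_beauty_permutation n → Pre_find_max_beauty_permutation n → Spec_find_max_beauty_permutation n (find_max_beauty_permutation n)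

-- ===== LEMMAS AND PROOFS =====

-- a power of two in [s, 2s) is unique
lemma pv_pow_unique (a b : Nat) (s : Int) (ha1 : s ≤ 2 ^ a) (ha2 : (2:Int) ^ a < 2 * s)
    (hb1 : s ≤ 2 ^ b) (hb2 : (2:Int) ^ b < 2 * s) : a = b := by
  rcases Nat.lt_trichotomy a b with h | h | h
  · exfalso
    have : (2:Int) ^ (a+1) ≤ 2 ^ b := by
      apply pow_le_pow_right₀ (by norm_num) (by omega)
    rw [pow_succ] at this
    omega
  · exact h
  · exfalso
    have : (2:Int) ^ (b+1) ≤ 2 ^ a := by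
      apply pow_le_pow_right₀ (by norm_num) (by omega)
    rw [pow_succ] at this
    omega

lemma pv_mask_spec (fuel : Nat) : ∀ (e : Nat) (top : Int), 0 ≤ top →
    top < 2 ^ (e + fuel) → ((2:Int) ^ e = 1 ∨ (2:Int) ^ e ≤ 2 * top) →
    ∃ j : Nat, pvBMask fuel (2 ^ e) top = 2 ^ j ∧ top < (2:Int) ^ j ∧
      ((2:Int) ^ j = 1 ∨ (2:Int) ^ j ≤ 2 * top) := by
  induction fuel with
  | zero =>
    intro e top h0 hlt hle
    exact ⟨e, rfl, by simpa using hlt, hle⟩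
  | succ f ih =>
    intro e top h0 hlt hle
    rw [pvBMask]
    by_cases h : (2:Int) ^ e - 1 < top
    · simp only [h, if_pos]
      have h2 : (2:Int) ^ e * 2 = 2 ^ (e + 1) := by ring
      rw [h2]
      apply ih (e + 1) top h0
      · have : e + 1 + f = e + (f + 1) := by omega
        rw [this]; exact hlt
      · right; rw [pow_succ]; omega
    · simp only [h, if_neg, not_false_iff]
      exact ⟨e, rfl, by omega, hle⟩

lemma pv_floordiv_pow (e : Nat) : PySem.Int.floordiv ((2:Int) ^ (e + 1)) 2 = 2 ^ e := by
  have h : ((2:Int) ^ (e + 1)) = (2 ^ e) * 2 := by ring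
  rw [h]
  simp [PySem.Int.floordiv]

lemma pv_inner_spec (fuel : Nat) : ∀ (e : Nat) (s : Int), 1 ≤ s → s ≤ 2 ^ e → e < fuel →
    ∃ j : Nat, pvAInner fuel (2 ^ e) s = 2 ^ j ∧ s ≤ (2:Int) ^ j ∧ (2:Int) ^ j < 2 * s ∧ j ≤ e := by
  induction fuel with
  | zero => intro e s _ _ h; omega
  | succ f ih =>
    intro e s h1 h2 hef
    rw [pvAInner]
    by_cases h : 2 * s ≤ (2:Int) ^ e
    · simp only [h, if_pos]
      have he : e ≠ 0 := by
        intro he0; rw [he0] at h; simp at h; omega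
      obtain ⟨e', rfl⟩ : ∃ e', e = e' + 1 := ⟨e - 1, by omega⟩
      rw [pv_floordiv_pow]
      have hs : s ≤ 2 ^ e' := by rw [pow_succ] at h; omega
      obtain ⟨j, hj⟩ := ih e' s h1 hs (by omega)
      exact ⟨j, hj.1, hj.2.1, hj.2.2.1, by omega⟩
    · simp only [h, if_neg, not_false_iff]
      exact ⟨e, rfl, h2, by omega, le_refl e⟩

-- the slice A takes from the reversed range equals B's block written by formula
lemma pv_block_eq (n s k : Int) (h1 : 1 ≤ s) (hsn : s ≤ n) (hsk : s ≤ k) (hk2 : k < 2 * s) :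
    PySem.List.slice ((PySem.List.pyRange 0 n 1).reverse) (some (n - s)) (some (n + s - k))
      = (PySem.List.pyRange (k - s) s 1).map (fun i => (k - 1) - i) := by
  rw [PySem.List.slice_toNat _ (by omega : (0:Int) ≤ n - s) (by omega : (0:Int) ≤ n + s - k)]
  apply List.ext_getElem
  · simp [PySem.List.length_pyRange_one]
    omega
  · intro i hi1 hi2
    simp only [List.getElem_take, List.getElem_drop, List.getElem_reverse,
      List.getElem_map]
    rw [PySem.List.getElem_pyRange_one, PySem.List.getElem_pyRange_one]
    simp [PySem.List.length_pyRange_one] at hi1 hi2 ⊢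
    omega

-- main invariant: A's loop prepends exactly the blocks B's recursion appends
lemma pv_main (n : Int) : ∀ (fuel : Nat) (s k : Int) (t : List Int),
    0 ≤ s → s ≤ n → s.toNat < fuel → (∃ e : Nat, e ≤ 20 ∧ k = 2 ^ e ∧ s ≤ k) →
    pvALoop fuel n ((PySem.List.pyRange 0 n 1).reverse) s t k = pvBuild fuel (s - 1) ++ t := by
  intro fuel
  induction fuel with
  | zero => intro s k t _ _ h; omega
  | succ f ih =>
    intro s k t h0 hsn hfuel hk
    obtain ⟨e, he20, hke, hsk⟩ := hk
    rw [pvALoop, pvBuild]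
    by_cases hs : s = 0
    · subst hs; simp
    · have h1 : 1 ≤ s := by omega
      have hs2e : s ≤ 2 ^ e := by omega
      obtain ⟨j, hj, hj1, hj2, hje⟩ := pv_inner_spec 64 e s h1 hs2e (by omega)
      have he2 : (2:Int) ^ e ≤ 2 ^ 20 := pow_le_pow_right₀ (by norm_num) he20
      have hbig : (2:Int) ^ 20 < 2 ^ 64 := by norm_num
      have htop : s - 1 < 2 ^ (0 + 64) := by simp only [Nat.zero_add]; omega
      obtain ⟨j', hmask, hj'1, hj'2⟩ :=
        pv_mask_spec 64 0 (s - 1) (by omega) htop (Or.inl (by norm_num))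
      rw [pow_zero] at hmask
      have hjj : j' = j := pv_pow_unique j' j s (by omega) (by omega) hj1 hj2
      subst hjj
      have hj20 : j' ≤ 20 := le_trans hje he20
      simp only [if_pos hs, if_neg (show ¬ s - 1 < 0 by omega), hmask, hke, hj]
      rw [pv_block_eq n s (2 ^ j') h1 hsn hj1 hj2]
      have hltf : ((2:Int) ^ j' - s).toNat < f := by omega
      rw [ih ((2:Int) ^ j' - s) (2 ^ j') _ (by omega) (by omega) hltf
        ⟨j', hj20, rfl, by omega⟩]
      rw [List.append_assoc]
      have e1 : (2:Int) ^ j' - s - 1 = 2 ^ j' - 1 - (s - 1) - 1 := by ring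
      have e2 : (2:Int) ^ j' - s = 2 ^ j' - 1 - (s - 1) := by ring
      have e3 : s = s - 1 + 1 := by ring
      rw [e1, e2, ← e3]

-- ===== VERDICT (by name: the statement is the Claim_ definition above) =====
theorem find_max_beauty_permutation_spec : Claim_equal_find_max_beauty_permutation := by
  intro n _hdom hpre
  obtain ⟨hlo, hhi⟩ := hpre
  unfold Spec_find_max_beauty_permutation
  unfold find_max_beauty_permutation find_max_beauty_permutation_alt
  simp only [PySem.List.slice?_none_none_neg_one, Option.getD_some]
  have h := pv_main (n + 1) ((n + 1).toNat + 1) (n + 1) (2 ^ 20) []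
    (by omega) (le_refl _) (by omega) ⟨20, le_refl _, rfl, by omega⟩
  rw [h, List.append_nil]
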